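-- pv_equiv track=rewrite | github.com/chapmanjacobd/library | xklb/utils/iterables.py | list_dict_filter_unique
-- ===== SOURCE A (Python) =====
-- from typing import Any, Iterator, List, Optional, Union
--
-- def list_dict_filter_unique(data: List[dict]) -> List[dict]:
--     if len(data) == 0:
--         return []
--
--     unique_values = {}
--     for key in set.intersection(*(set(d.keys()) for d in data)):
--         values = {d[key] for d in data if key in d}
--         if len(values) > 1:
--             unique_values[key] = values
--     filtered_data = [{k: v for k, v in d.items() if k in unique_values} for d in data]
--     return filtered_data
-- ===== SOURCE B (Python) =====
-- def list_dict_filter_unique(data):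
--     counts = {}
--     values = {}
--     for d in data:
--         for k, v in d.items():
--             counts[k] = counts.get(k, 0) + 1
--             values.setdefault(k, set()).add(v)
--     n = len(data)
--     kept = {k for k, c in counts.items() if c == n and len(values[k]) > 1}
--     return [{k: v for k, v in d.items() if k in kept} for d in data]
-- ===== Notes on version B (the rewrite author's own statement) =====
-- stated objective: alternative
-- what changed: Replaces set.intersection over all key sets followed by a per-common-key rescan of all dicts with a single fused accumulation pass that builds per-key occurrence counts and value sets, keeping exactly the keys with count == len(data) and more than one distinct value.
import Mathlib
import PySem

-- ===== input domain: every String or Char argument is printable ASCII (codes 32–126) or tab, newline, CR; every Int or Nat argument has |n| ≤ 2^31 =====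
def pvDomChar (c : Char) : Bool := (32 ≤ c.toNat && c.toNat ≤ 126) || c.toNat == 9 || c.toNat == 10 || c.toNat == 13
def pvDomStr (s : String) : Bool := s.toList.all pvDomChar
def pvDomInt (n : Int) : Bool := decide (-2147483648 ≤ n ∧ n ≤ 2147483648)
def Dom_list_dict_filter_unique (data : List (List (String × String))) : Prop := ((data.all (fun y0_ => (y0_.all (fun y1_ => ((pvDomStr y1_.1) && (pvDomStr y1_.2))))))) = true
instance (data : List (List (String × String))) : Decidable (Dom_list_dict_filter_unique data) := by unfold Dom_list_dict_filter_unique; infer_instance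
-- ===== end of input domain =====

-- B replaces A's set.intersection over all key sets plus a per-common-key rescan of every dict
-- with one fused accumulation pass building per-key counts and value sets (objective: alternative, same cost).
-- ===== PORT A =====
def list_dict_filter_unique (data : List (List (String × String))) : List (List (String × String)) :=
  if data.length = 0 then []
  else
    let ds := data.map (fun d => PySem.Dict.ofList d)
    -- set.intersection(*(set(d.keys()) for d in data)): fold of pairwise intersection
    let keySets := ds.map (fun d => PySem.Set.ofList (PySem.Dict.keys d))
    let inter := keySets.tail.foldl PySem.Set.inter (keySets.headD [])
    -- iterating the intersection set only to BUILD a dict later used by membership: order-independent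
    let uv := inter.foldl
      (fun (u : PySem.Dict String (PySem.Set String)) key =>
        let values := PySem.Set.ofList
          (((ds.filter (fun d => PySem.Dict.contains d key)).map (fun d => PySem.Dict.getD d key "")))
        if 1 < values.length then u.insert key values else u)
      PySem.Dict.empty
    ds.map (fun d => (PySem.Dict.items d).filter (fun kv => PySem.Dict.contains uv kv.1))

-- ===== PORT B =====
def list_dict_filter_unique_alt (data : List (List (String × String))) : List (List (String × String)) :=
  let ds := data.map (fun d => PySem.Dict.ofList d)
  let acc := ds.foldl
    (fun (p : PySem.Dict String Int × PySem.Dict String (PySem.Set String)) d =>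
      (PySem.Dict.items d).foldl
        (fun p kv =>
          (p.1.insert kv.1 (p.1.getD kv.1 0 + 1),
           p.2.modify kv.1 [] (fun s => PySem.Set.add s kv.2)))
        p)
    (PySem.Dict.empty, PySem.Dict.empty)
  let n : Int := data.length
  let kept : PySem.Set String := PySem.Set.ofList
    (((acc.1.items.filter (fun kc => kc.2 == n && 1 < (acc.2.getD kc.1 []).length)).map (fun kc => kc.1)))
  ds.map (fun d => (PySem.Dict.items d).filter (fun kv => PySem.Set.contains kept kv.1))

-- ===== PRECONDITION & SPEC =====
def Spec_list_dict_filter_unique (data : List (List (String × String))) (out : List (List (String × String))) : Prop := out = list_dict_filter_unique_alt data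
instance (data : List (List (String × String))) (out : List (List (String × String))) : Decidable (Spec_list_dict_filter_unique data out) := by unfold Spec_list_dict_filter_unique; infer_instance

-- ===== CLAIM (what is proved, stated in full; the proofs are below) =====
def Claim_equal_list_dict_filter_unique : Prop := ∀ (data : List (List (String × String))), Dom_list_dict_filter_unique data → Spec_list_dict_filter_unique data (list_dict_filter_unique data)

-- ===== LEMMAS AND PROOFS =====

-- helper abbreviations for the proofs
def pvDicts (data : List (List (String × String))) : List (PySem.Dict String String) :=
  data.map (fun d => PySem.Dict.ofList d)

def pvItems (data : List (List (String × String))) : List (String × String) :=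
  (pvDicts data).flatMap PySem.Dict.items

-- each filtered item list of one dict, projected to values
lemma dict_filter_snd (d : PySem.Dict String String) (h : d.keys.Nodup) (k : String) :
    ((d.items.filter (fun p => p.1 == k)).map Prod.snd)
      = if d.contains k then [d.getD k ""] else [] := by
  rw [PySem.Dict.items_eq_map_keys d h ""]
  rw [List.filter_map, List.map_map]
  have hf : ((fun p => p.1 == k) ∘ fun j => ((j, d.getD j "") : String × String)) = fun j => j == k := rfl
  rw [hf]
  rw [PySem.Dict.contains_eq_decide_mem_keys]
  by_cases hm : k ∈ d.keys
  · rw [List.filter_beq, List.count_eq_one_of_mem h hm]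
    simp [hm]
  · rw [List.filter_beq, List.count_eq_zero_of_not_mem hm]
    simp [hm]

lemma flat_values (ds : List (PySem.Dict String String)) (h : ∀ d ∈ ds, d.keys.Nodup) (k : String) :
    (((ds.flatMap PySem.Dict.items).filter (fun p => p.1 == k)).map Prod.snd)
      = (ds.filter (fun d => d.contains k)).map (fun d => d.getD k "") := by
  induction ds with
  | nil => rfl
  | cons d ds ih =>
    have hd := h d (by simp)
    have hrest : ∀ d ∈ ds, PySem.Dict.keys d |>.Nodup := fun d hm => h d (by simp [hm])
    simp only [List.flatMap_cons, List.filter_append, List.map_append, ih hrest,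
      List.filter_cons]
    rw [dict_filter_snd d hd k]
    by_cases hc : d.contains k = true
    · simp [hc]
    · simp [hc]

lemma flat_count (ds : List (PySem.Dict String String)) (h : ∀ d ∈ ds, d.keys.Nodup) (k : String) :
    ((ds.flatMap PySem.Dict.items).map Prod.fst).count k
      = ds.countP (fun d => d.contains k) := by
  induction ds with
  | nil => rfl
  | cons d ds ih =>
    have hd := h d (by simp)
    have hrest : ∀ d ∈ ds, PySem.Dict.keys d |>.Nodup := fun d hm => h d (by simp [hm])
    simp only [List.flatMap_cons, List.map_append, List.count_append, ih hrest, List.countP_cons]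
    have hkeys : d.items.map Prod.fst = d.keys := rfl
    rw [hkeys, PySem.Dict.contains_eq_decide_mem_keys]
    by_cases hm : k ∈ d.keys
    · rw [List.count_eq_one_of_mem hd hm]; simp [hm, Nat.add_comm]
    · rw [List.count_eq_zero_of_not_mem hm]; simp [hm]

lemma getD_foldl_modify_add (l : List (String × String)) (m : PySem.Dict String (PySem.Set String)) (k : String) :
    (l.foldl (fun m p => m.modify p.1 [] (fun s => PySem.Set.add s p.2)) m).getD k []
      = ((l.filter (fun p => p.1 == k)).map Prod.snd).foldl PySem.Set.add (m.getD k []) := by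
  induction l generalizing m with
  | nil => rfl
  | cons p l ih =>
    simp only [List.foldl_cons, List.filter_cons]
    rw [ih]
    by_cases hp : p.1 = k
    · simp [hp]
    · have hne : (p.1 == k) = false := by simp [hp]
      simp [hne, PySem.Dict.getD_modify, Ne.symm hp]

lemma mem_foldl_inter (l : List (PySem.Set String)) (s : PySem.Set String) (k : String) :
    k ∈ l.foldl PySem.Set.inter s ↔ k ∈ s ∧ ∀ t ∈ l, k ∈ t := by
  induction l generalizing s with
  | nil => simp
  | cons t l ih =>
    simp only [List.foldl_cons, ih, PySem.Set.mem_inter, List.mem_cons]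
    constructor
    · rintro ⟨⟨hs, ht⟩, hl⟩
      exact ⟨hs, fun u hu => hu.elim (fun e => e ▸ ht) (hl u)⟩
    · rintro ⟨hs, hl⟩
      exact ⟨⟨hs, hl t (Or.inl rfl)⟩, fun u hu => hl u (Or.inr hu)⟩

lemma contains_foldl_ite_insert (l : List String) (u0 : PySem.Dict String (PySem.Set String))
    (cond : String → Prop) [DecidablePred cond] (f : String → PySem.Set String) (k : String) :
    (l.foldl (fun u key => if cond key then u.insert key (f key) else u) u0).contains k
      = (u0.contains k || (decide (k ∈ l) && decide (cond k))) := by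
  induction l generalizing u0 with
  | nil => simp
  | cons a l ih =>
    simp only [List.foldl_cons]
    by_cases ha : cond a
    · rw [if_pos ha, ih, PySem.Dict.contains_insert]
      by_cases hk : k = a
      · subst hk; simp [ha]
      · rw [show (k == a) = false by simp [hk]]
        simp [hk]
    · rw [if_neg ha, ih]
      by_cases hk : k = a
      · subst hk; simp [ha]
      · simp [hk]

lemma mem_inter_all (ds : List (PySem.Dict String String)) (hne : ds ≠ []) (j : String) :
    j ∈ ((ds.map (fun d => PySem.Set.ofList d.keys)).tail.foldl PySem.Set.inter
          ((ds.map (fun d => PySem.Set.ofList d.keys)).headD []))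
      ↔ ∀ d ∈ ds, j ∈ d.keys := by
  obtain ⟨d0, rest, rfl⟩ := List.exists_cons_of_ne_nil hne
  simp [mem_foldl_inter, PySem.Set.mem_ofList]

theorem list_dict_filter_unique_spec : Claim_equal_list_dict_filter_unique := by
  intro data _hdom
  unfold Spec_list_dict_filter_unique
  by_cases hd : data = []
  · subst hd; rfl
  · have hlen : ¬ data.length = 0 := by simpa [List.length_eq_zero_iff] using hd
    unfold list_dict_filter_unique list_dict_filter_unique_alt
    rw [if_neg hlen]
    have hds : ∀ d ∈ data.map (fun d => PySem.Dict.ofList d), (PySem.Dict.keys d).Nodup := by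
      intro d hm
      obtain ⟨l, -, rfl⟩ := List.mem_map.mp hm
      exact PySem.Dict.nodup_keys_ofList l
    set ds := data.map (fun d => PySem.Dict.ofList d) with hdsdef
    have hdsne : ds ≠ [] := by simp [hdsdef, hd]
    have hdslen : ds.length = data.length := by simp [hdsdef]
    set L := ds.flatMap PySem.Dict.items with hLdef
    -- restructure B's fused pair-fold into two flat folds over all items
    have hflat : ∀ (p0 : PySem.Dict String Int × PySem.Dict String (PySem.Set String)),
        ds.foldl (fun p d => d.items.foldl (fun p kv =>
            (p.1.insert kv.1 (p.1.getD kv.1 0 + 1),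
             p.2.modify kv.1 [] fun s => s.add kv.2)) p) p0
          = (L.foldl (fun c kv => c.insert kv.1 (c.getD kv.1 0 + 1)) p0.1,
             L.foldl (fun m kv => m.modify kv.1 [] fun s => s.add kv.2) p0.2) := by
      intro p0
      obtain ⟨a, b⟩ := p0
      rw [show (ds.foldl (fun p d => d.items.foldl (fun p kv =>
            (p.1.insert kv.1 (p.1.getD kv.1 0 + 1),
             p.2.modify kv.1 [] fun s => PySem.Set.add s kv.2)) p) (a, b))
          = (L.foldl (fun (p : PySem.Dict String Int × PySem.Dict String (PySem.Set String)) kv =>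
            (p.1.insert kv.1 (p.1.getD kv.1 0 + 1),
             p.2.modify kv.1 [] fun s => PySem.Set.add s kv.2)) (a, b))
          from (List.foldl_flatMap (f := PySem.Dict.items)).symm]
      rw [PySem.List.foldl_prod_mk
        (f := fun (c : PySem.Dict String Int) (kv : String × String) => c.insert kv.1 (c.getD kv.1 0 + 1))
        (g := fun (m : PySem.Dict String (PySem.Set String)) (kv : String × String) =>
          m.modify kv.1 [] fun s => PySem.Set.add s kv.2)]
    simp only [hflat]
    set C : PySem.Dict String Int := L.foldl (fun c kv => c.insert kv.1 (c.getD kv.1 0 + 1)) PySem.Dict.empty with hCdef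
    set V : PySem.Dict String (PySem.Set String) := L.foldl (fun m kv => m.modify kv.1 [] fun s => PySem.Set.add s kv.2) PySem.Dict.empty with hVdef
    have hCmap : C = (L.map Prod.fst).foldl (fun c x => c.insert x (c.getD x 0 + 1)) PySem.Dict.empty := by
      rw [hCdef, List.foldl_map]
    have hC : ∀ j, C.getD j 0 = ((L.map Prod.fst).count j : Int) := by
      intro j
      rw [hCmap, PySem.Dict.getD_foldl_insert_add_one]
      simp
    have hCkeys : ∀ j : String, C.contains j = true ↔ j ∈ L.map Prod.fst := by
      intro j
      rw [hCmap, PySem.Dict.contains_iff_mem_keys, PySem.Dict.keys_foldl_insert,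
        PySem.Set.mem_update]
      simp
    have hCnodup : C.keys.Nodup := by
      rw [hCmap]
      exact PySem.Dict.nodup_keys_foldl_insert _ _ _ (by simp)
    have hV : ∀ j, V.getD j []
        = PySem.Set.ofList ((ds.filter (fun d => d.contains j)).map (fun d => d.getD j "")) := by
      intro j
      rw [hVdef, getD_foldl_modify_add, PySem.Dict.getD_empty, ← PySem.Set.ofList_eq_foldl,
        flat_values ds hds j]
    have hcount : ∀ j, (L.map Prod.fst).count j = ds.countP (fun d => d.contains j) :=
      flat_count ds hds
    have hinter : ∀ j : String,
        (j ∈ ((ds.map (fun d => PySem.Set.ofList d.keys)).tail.foldl PySem.Set.inter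
          ((ds.map (fun d => PySem.Set.ofList d.keys)).headD [])))
        ↔ ∀ d ∈ ds, j ∈ d.keys := mem_inter_all ds hdsne
    refine congrFun (congrArg List.map (funext fun dct =>
      congrArg (fun p => List.filter p dct.items) (funext fun kv => ?_))) ds
    rw [Bool.eq_iff_iff, contains_foldl_ite_insert]
    simp only [PySem.Dict.contains_empty, Bool.false_or, Bool.and_eq_true, decide_eq_true_eq,
      PySem.Set.contains_iff, PySem.Set.mem_ofList, List.mem_map, List.mem_filter]
    constructor
    · rintro ⟨hin, hlt⟩
      have hall : ∀ d ∈ ds, kv.1 ∈ d.keys := (hinter kv.1).mp hin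
      have hcnt : ds.countP (fun d => d.contains kv.1) = ds.length := by
        rw [List.countP_eq_length]
        intro d hm
        rw [PySem.Dict.contains_eq_decide_mem_keys]
        simp [hall d hm]
      have hmemL : kv.1 ∈ L.map Prod.fst := by
        rw [← List.count_pos_iff, hcount kv.1, hcnt]
        exact List.length_pos_of_ne_nil hdsne
      have hcontains : C.contains kv.1 = true := (hCkeys kv.1).mpr hmemL
      have hsome : ∃ c, C.get? kv.1 = some c := by
        rw [← Option.isSome_iff_exists, ← PySem.Dict.contains_eq_isSome_get?]
        exact hcontains
      obtain ⟨c, hc⟩ := hsome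
      have hcval : c = (data.length : Int) := by
        have := PySem.Dict.getD_of_get?_eq_some C 0 hc
        rw [hC kv.1, hcount kv.1, hcnt, hdslen] at this
        omega
      refine ⟨(kv.1, c), ⟨PySem.Dict.mem_items_of_get?_eq_some C hc, ?_⟩, rfl⟩
      simp only [hcval, hV kv.1, beq_self_eq_true, true_and]
      exact hlt
    · rintro ⟨⟨j, c⟩, ⟨hmem, hbe, hlt⟩, hfst⟩
      simp only at hfst
      rw [← hfst]
      have hget : C.get? j = some c := PySem.Dict.get?_of_mem_items C hmem hCnodup
      have hgd : C.getD j 0 = c := PySem.Dict.getD_of_get?_eq_some C 0 hget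
      rw [hC j, hcount j] at hgd
      have hcn : c = (data.length : Int) := by simpa using hbe
      rw [hcn] at hgd
      have hcnt : ds.countP (fun d => d.contains j) = ds.length := by
        rw [hdslen]
        exact_mod_cast hgd
      have hall : ∀ d ∈ ds, j ∈ d.keys := by
        intro d hm
        have h2 := List.countP_eq_length.mp hcnt d hm
        rw [PySem.Dict.contains_eq_decide_mem_keys] at h2
        simpa using h2
      refine ⟨(hinter j).mpr hall, ?_⟩
      rw [hV j] at hlt
      exact hlt
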